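-- pv_equiv track=rewrite | github.com/sirken/coding-practice | codewars/rotate-the-letters.py | group_cities
-- ===== SOURCE A (Python) =====
-- def check_rotate(word1, word2):
--     for pos, letter in enumerate(word1):
--         if f'{word1[pos:]}{word1[:pos]}'.lower() == word2.lower():
--             return True
--     return False
--
-- def group_cities(seq):
--     out = []
--     for city in seq:
--         l = sorted({c for c in seq if check_rotate(city, c)})
--         if l not in out:
--             out.append(l)
--     out.sort()
--     out.sort(key=len, reverse=True)
--     return out
-- ===== SOURCE B (Python) =====
-- def group_cities(seq):
--     by_lower = {}
--     for city in seq: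
--         by_lower.setdefault(city.lower(), set()).add(city)
--     out = []
--     seen = set()
--     for city in seq:
--         t = city.lower()
--         members = sorted({c for i in range(len(t)) for c in by_lower.get(t[i:] + t[:i], ())})
--         key = tuple(members)
--         if key not in seen:
--             seen.add(key)
--             out.append(members)
--     out.sort()
--     out.sort(key=len, reverse=True)
--     return out
-- ===== Notes on version B (the rewrite author's own statement) =====
-- stated objective: faster
-- what changed: Replaces A's all-pairs scan (for each city, rescan the whole list and try every rotation of it against every candidate) by a hash index from lowercased city to its occurrences, so each city's group is the union of dict lookups over its own rotations; duplicate groups are skipped via a hash set instead of list membership.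
import Mathlib
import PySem

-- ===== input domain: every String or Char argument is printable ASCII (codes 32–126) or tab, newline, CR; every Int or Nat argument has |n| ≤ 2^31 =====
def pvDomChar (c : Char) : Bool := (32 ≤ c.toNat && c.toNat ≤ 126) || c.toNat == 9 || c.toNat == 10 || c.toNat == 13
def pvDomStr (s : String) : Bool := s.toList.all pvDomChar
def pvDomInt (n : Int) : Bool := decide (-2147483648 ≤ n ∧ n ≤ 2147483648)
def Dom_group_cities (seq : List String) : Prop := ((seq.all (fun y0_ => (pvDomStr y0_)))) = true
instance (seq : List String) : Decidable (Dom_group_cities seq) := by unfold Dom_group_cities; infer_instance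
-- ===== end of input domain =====

-- B replaces A's all-pairs rotation scan by a hash index from lowercased city to its occurrences,
-- so each city's group is a union of dict lookups over its own rotations (objective: faster).

-- ===== PORT A =====
-- string equality and f'{x}{y}' concatenation are ported on .toList (exact: String equality = toList equality)
def check_rotate (word1 word2 : String) : Bool :=
  (PySem.List.enumerate word1.toList).any (fun p =>
    PySem.Chars.lower (PySem.List.slice word1.toList (some p.1) none ++ PySem.List.slice word1.toList none (some p.1))
      == PySem.Chars.lower word2.toList)

def group_cities (seq : List String) : List (List String) :=
  let out := seq.foldl (fun out city =>
    let l := PySem.List.sorted (PySem.Set.ofList (seq.filter (fun c => check_rotate city c))) (fun x => x) false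
    if l ∈ out then out else out ++ [l]) []
  let out1 := PySem.List.sorted out (fun x => x) false
  PySem.List.sorted out1 (fun g => g.length) true

-- ===== PORT B =====
-- by_lower.setdefault(k, set()).add(city) = insert set() if k absent, then add city: Dict.modify;
-- the set comprehension {c for i in range(len(t)) for c in by_lower.get(r, ())} is
-- Set.ofList of the flatMap in the same iteration order; get's default () iterates to nothing = Set.empty;
-- tuple(members) as the hash key is ported as the list itself (tupling is only for hashability)
def group_cities_alt (seq : List String) : List (List String) :=
  let by_lower := seq.foldl (fun (d : PySem.Dict (List Char) (PySem.Set String)) city =>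
    d.modify (PySem.Chars.lower city.toList) PySem.Set.empty (fun s => PySem.Set.add s city)) PySem.Dict.empty
  let p := seq.foldl (fun (acc : List (List String) × PySem.Set (List String)) city =>
    let t := PySem.Chars.lower city.toList
    let members := PySem.List.sorted (PySem.Set.ofList
      ((PySem.List.pyRange 0 (t.length : Int) 1).flatMap
        (fun i => by_lower.getD (PySem.List.slice t (some i) none ++ PySem.List.slice t none (some i))
          PySem.Set.empty))) (fun x => x) false
    if PySem.Set.contains acc.2 members then acc
    else (acc.1 ++ [members], PySem.Set.add acc.2 members)) ([], PySem.Set.empty)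
  let out1 := PySem.List.sorted p.1 (fun x => x) false
  PySem.List.sorted out1 (fun g => g.length) true

-- ===== PRECONDITION & SPEC =====
def Spec_group_cities (seq : List String) (out : List (List String)) : Prop := out = group_cities_alt seq
instance (seq : List String) (out : List (List String)) : Decidable (Spec_group_cities seq out) := by unfold Spec_group_cities; infer_instance

-- ===== CLAIM (what is proved, stated in full; the proofs are below) =====
def Claim_equal_group_cities : Prop := ∀ (seq : List String), Dom_group_cities seq → Spec_group_cities seq (group_cities seq)

-- ===== LEMMAS AND PROOFS =====

-- A's rotation test, characterized: some rotation of lowercased word1 equals lowercased word2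
theorem check_rotate_iff (a b : String) :
    check_rotate a b = true ↔
      ∃ k < a.toList.length,
        (PySem.Chars.lower a.toList).drop k ++ (PySem.Chars.lower a.toList).take k
          = PySem.Chars.lower b.toList := by
  unfold check_rotate
  rw [List.any_eq_true]
  constructor
  · rintro ⟨p, hp, hcond⟩
    obtain ⟨k, hk, rfl⟩ := (PySem.List.mem_enumerate_iff _ _ _).mp hp
    refine ⟨k, hk, ?_⟩
    rw [beq_iff_eq] at hcond
    rw [zero_add] at hcond
    rw [PySem.List.slice_from _ (Int.natCast_nonneg k),
        PySem.List.slice_to _ (Int.natCast_nonneg k)] at hcond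
    simp only [Int.toNat_natCast] at hcond
    rw [← hcond]
    simp [PySem.Chars.lower]
  · rintro ⟨k, hk, hrot⟩
    refine ⟨((0 : Int) + k, a.toList[k]), (PySem.List.mem_enumerate_iff _ _ _).mpr ⟨k, hk, rfl⟩, ?_⟩
    rw [beq_iff_eq, zero_add]
    rw [PySem.List.slice_from _ (Int.natCast_nonneg k),
        PySem.List.slice_to _ (Int.natCast_nonneg k)]
    simp only [Int.toNat_natCast]
    rw [← hrot]
    simp [PySem.Chars.lower]

-- the dict after B's first loop maps k to the set of cities whose lowercase form is k
theorem getD_by_lower (m : List String) : ∀ (d : PySem.Dict (List Char) (PySem.Set String))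
    (k : List Char),
    (m.foldl (fun d city => d.modify (PySem.Chars.lower city.toList) PySem.Set.empty
        (fun s => PySem.Set.add s city)) d).getD k PySem.Set.empty
    = PySem.Set.update (d.getD k PySem.Set.empty)
        (m.filter (fun c => PySem.Chars.lower c.toList == k)) := by
  induction m with
  | nil =>
    intro d k
    simp [PySem.Set.update_nil]
  | cons c m' IH =>
    intro d k
    rw [List.foldl_cons, IH]
    have hmod : (d.modify (PySem.Chars.lower c.toList) PySem.Set.empty (fun s => PySem.Set.add s c)).getD k PySem.Set.empty
        = if k = PySem.Chars.lower c.toList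
          then PySem.Set.add (d.getD (PySem.Chars.lower c.toList) PySem.Set.empty) c
          else d.getD k PySem.Set.empty := by
      unfold PySem.Dict.modify
      rw [PySem.Dict.getD_insert]
    rw [hmod]
    by_cases he : k = PySem.Chars.lower c.toList
    · subst he
      rw [List.filter_cons_of_pos (by simp)]
      rw [PySem.Set.update_cons]
      simp
    · rw [if_neg he]
      rw [List.filter_cons_of_neg (by simp [Ne.symm he])]

-- per city, A's group equals B's group
theorem group_eq (seq : List String) (city : String) :
    PySem.List.sorted (PySem.Set.ofList (seq.filter (fun c => check_rotate city c))) (fun x => x) false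
    = PySem.List.sorted (PySem.Set.ofList
        ((PySem.List.pyRange 0 ((PySem.Chars.lower city.toList).length : Int) 1).flatMap
          (fun i => (seq.foldl (fun (d : PySem.Dict (List Char) (PySem.Set String)) c =>
              d.modify (PySem.Chars.lower c.toList) PySem.Set.empty (fun s => PySem.Set.add s c))
              PySem.Dict.empty).getD
            (PySem.List.slice (PySem.Chars.lower city.toList) (some i) none
              ++ PySem.List.slice (PySem.Chars.lower city.toList) none (some i))
            PySem.Set.empty))) (fun x => x) false := by
  set t := PySem.Chars.lower city.toList with ht
  have hlen : t.length = city.toList.length := by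
    rw [ht]; simp [PySem.Chars.lower]
  have hup : ∀ (l : List String), PySem.Set.update PySem.Set.empty l = PySem.Set.ofList l :=
    fun l => PySem.Set.update_nil_left l
  have hmemL : ∀ c, c ∈ PySem.Set.ofList (seq.filter (fun c => check_rotate city c))
      ↔ c ∈ seq ∧ check_rotate city c = true := by
    intro c
    rw [PySem.Set.mem_ofList, List.mem_filter]
  have hmemR : ∀ c, c ∈ PySem.Set.ofList
      ((PySem.List.pyRange 0 (t.length : Int) 1).flatMap
        (fun i => (seq.foldl (fun (d : PySem.Dict (List Char) (PySem.Set String)) c =>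
            d.modify (PySem.Chars.lower c.toList) PySem.Set.empty (fun s => PySem.Set.add s c))
            PySem.Dict.empty).getD
          (PySem.List.slice t (some i) none ++ PySem.List.slice t none (some i)) PySem.Set.empty))
      ↔ c ∈ seq ∧ check_rotate city c = true := by
    intro c
    rw [PySem.Set.mem_ofList, List.mem_flatMap]
    rw [check_rotate_iff]
    constructor
    · rintro ⟨i, hi, hc⟩
      rw [PySem.List.pyRange_zero_natCast, List.mem_map] at hi
      obtain ⟨k, hk, rfl⟩ := hi
      have hk' : k < t.length := List.mem_range.mp hk
      rw [PySem.List.slice_from _ (Int.natCast_nonneg k),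
          PySem.List.slice_to _ (Int.natCast_nonneg k)] at hc
      simp only [Int.toNat_natCast] at hc
      rw [getD_by_lower] at hc
      have hempty : (PySem.Dict.empty : PySem.Dict (List Char) (PySem.Set String)).getD
          (t.drop k ++ t.take k) PySem.Set.empty = PySem.Set.empty := rfl
      rw [hempty, hup, PySem.Set.mem_ofList, List.mem_filter] at hc
      refine ⟨hc.1, k, by omega, beq_iff_eq.mp hc.2 |>.symm⟩
    · rintro ⟨hcseq, k, hk, hrot⟩
      refine ⟨(k : Int), ?_, ?_⟩
      · rw [PySem.List.pyRange_zero_natCast, List.mem_map]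
        exact ⟨k, List.mem_range.mpr (by omega), rfl⟩
      · rw [PySem.List.slice_from _ (Int.natCast_nonneg k),
            PySem.List.slice_to _ (Int.natCast_nonneg k)]
        simp only [Int.toNat_natCast]
        rw [getD_by_lower]
        have hempty : (PySem.Dict.empty : PySem.Dict (List Char) (PySem.Set String)).getD
            (t.drop k ++ t.take k) PySem.Set.empty = PySem.Set.empty := rfl
        rw [hempty, hup, PySem.Set.mem_ofList, List.mem_filter]
        exact ⟨hcseq, beq_iff_eq.mpr hrot.symm⟩
  have hperm : List.Perm (PySem.Set.ofList (seq.filter (fun c => check_rotate city c)))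
      (PySem.Set.ofList
        ((PySem.List.pyRange 0 (t.length : Int) 1).flatMap
          (fun i => (seq.foldl (fun (d : PySem.Dict (List Char) (PySem.Set String)) c =>
              d.modify (PySem.Chars.lower c.toList) PySem.Set.empty (fun s => PySem.Set.add s c))
              PySem.Dict.empty).getD
            (PySem.List.slice t (some i) none ++ PySem.List.slice t none (some i)) PySem.Set.empty))) := by
    apply (List.perm_ext_iff_of_nodup (PySem.Set.nodup_ofList _) (PySem.Set.nodup_ofList _)).mpr
    intro c
    rw [hmemL, hmemR]
  symm
  apply PySem.List.sorted_eq_of_perm_of_pairwise_lt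
  · exact (PySem.List.sorted_perm _ _ _).trans hperm
  · exact PySem.List.sorted_ofList_pairwise_lt _

-- B's dedup loop over (out, seen) with seen = out computes A's list-membership dedup loop
theorem fold_dedup (f : String → List String) (m : List String) :
    ∀ (out : List (List String)),
    (m.foldl (fun (acc : List (List String) × PySem.Set (List String)) city =>
        let v := f city
        if PySem.Set.contains acc.2 v then acc
        else (acc.1 ++ [v], PySem.Set.add acc.2 v)) (out, out)).1
    = m.foldl (fun out city =>
        let v := f city
        if v ∈ out then out else out ++ [v]) out := by
  induction m with
  | nil => intro out; rfl
  | cons city m' IH =>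
    intro out
    rw [List.foldl_cons, List.foldl_cons]
    by_cases h : f city ∈ out
    · have hc : PySem.Set.contains out (f city) = true := by
        simp [PySem.Set.contains, h]
      simp only [hc, if_pos, h]
      exact IH out
    · have hc : PySem.Set.contains out (f city) = false := by
        simp [PySem.Set.contains, h]
      simp only [hc, h, if_false, Bool.false_eq_true]
      rw [PySem.Set.add_of_not_mem h]
      exact IH (out ++ [f city])

-- ===== VERDICT (by name: the statement is the Claim_ definition above) =====
theorem group_cities_spec : Claim_equal_group_cities := by
  intro seq _
  unfold Spec_group_cities group_cities group_cities_alt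
  simp only []
  congr 1
  congr 1
  rw [← fold_dedup (fun city =>
    PySem.List.sorted (PySem.Set.ofList (seq.filter (fun c => check_rotate city c))) (fun x => x) false)
    seq []]
  apply congrArg Prod.fst
  apply PySem.List.foldl_congr_mem
  intro acc city _
  simp only []
  rw [group_eq seq city]
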